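-- pv_equiv track=rewrite | github.com/artificial-intelligence-first/smas | catalog/agents/sub/content-retriever-sag/code/retriever.py | _extract_relevant_section
-- ===== SOURCE A (Python) =====
-- from typing import Any, Dict, List
--
-- def _extract_relevant_section(content: str, keywords: List[str]) -> str:
--     """Extract the heading closest to the first keyword occurrence."""
--     lines = content.split("\n")
--
--     for index, line in enumerate(lines):
--         if any(keyword in line.lower() for keyword in keywords):
--             for heading_index in range(index, -1, -1):
--                 if lines[heading_index].startswith("#"):
--                     return lines[heading_index].strip()
--             break
--
--     return "Introduction"
-- ===== SOURCE B (Python) =====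
-- from typing import List
--
-- def _extract_relevant_section(content: str, keywords: List[str]) -> str:
--     """Single forward pass: remember the most recent heading, return it at the first keyword hit."""
--     heading = None
--     for line in content.split("\n"):
--         if line.startswith("#"):
--             heading = line
--         if any(keyword in line.lower() for keyword in keywords):
--             return heading.strip() if heading is not None else "Introduction"
--     return "Introduction"
-- ===== Notes on version B (the rewrite author's own statement) =====
-- stated objective: simpler
-- what changed: Replaced A's two nested scans (find the first keyword line, then rescan backwards for the nearest heading) by a single forward pass that carries the most recently seen heading, updated before the keyword test.
import Mathlib
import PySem

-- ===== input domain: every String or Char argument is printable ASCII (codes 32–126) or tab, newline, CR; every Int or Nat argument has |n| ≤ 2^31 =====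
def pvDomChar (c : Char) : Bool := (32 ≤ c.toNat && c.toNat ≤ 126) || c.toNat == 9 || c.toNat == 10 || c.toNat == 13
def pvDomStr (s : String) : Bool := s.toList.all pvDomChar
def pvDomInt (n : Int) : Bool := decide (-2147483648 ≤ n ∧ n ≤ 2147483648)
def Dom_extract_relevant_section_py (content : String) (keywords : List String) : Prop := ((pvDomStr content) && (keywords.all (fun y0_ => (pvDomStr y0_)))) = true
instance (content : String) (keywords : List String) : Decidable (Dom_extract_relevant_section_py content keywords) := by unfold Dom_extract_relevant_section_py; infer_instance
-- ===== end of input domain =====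

-- B replaces A's backward rescan at the first keyword hit by a single forward pass that
-- remembers the most recent heading (objective: simpler, one pass).

-- ===== PORT A =====
-- any(keyword in line.lower() for keyword in keywords)  (used verbatim by both Pythons)
def pvKwHit (keywords : List String) (line : String) : Bool :=
  keywords.any (fun kw => PySem.Str.isIn kw (PySem.Str.lower line))

-- inner loop: for heading_index in range(index, -1, -1): …  (falling out = break → "Introduction")
def pvBackA (lines : List String) : List Int → String
  | [] => "Introduction"
  | hi :: rest =>
    match PySem.List.pyGet? lines hi with
    | some l => if PySem.Str.startswith l "#" then PySem.Str.strip l else pvBackA lines rest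
    | none => pvBackA lines rest   -- unreachable: range(index, -1, -1) indices are always in range

-- outer loop: for index, line in enumerate(lines): …
def pvLoopA (lines : List String) (keywords : List String) : List (Int × String) → String
  | [] => "Introduction"
  | (i, line) :: rest =>
    if pvKwHit keywords line then pvBackA lines (PySem.List.pyRange i (-1) (-1))
    else pvLoopA lines keywords rest

def extract_relevant_section_py (content : String) (keywords : List String) : String :=
  let lines := (PySem.Str.split? content "\n").getD []   -- sep "\n" ≠ "", so split? is always some
  pvLoopA lines keywords (PySem.List.enumerate lines 0)

-- ===== PORT B =====
-- forward pass with the most recent heading (heading = None initially)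
def pvLoopB (keywords : List String) : Option String → List String → String
  | _, [] => "Introduction"
  | heading, line :: rest =>
    let heading' := if PySem.Str.startswith line "#" then some line else heading
    if pvKwHit keywords line then
      match heading' with
      | some h => PySem.Str.strip h
      | none => "Introduction"
    else pvLoopB keywords heading' rest

def extract_relevant_section_py_alt (content : String) (keywords : List String) : String :=
  pvLoopB keywords none ((PySem.Str.split? content "\n").getD [])

-- ===== PRECONDITION & SPEC =====
def Spec_extract_relevant_section_py (content : String) (keywords : List String) (out : String) : Prop := out = extract_relevant_section_py_alt content keywords
instance (content : String) (keywords : List String) (out : String) : Decidable (Spec_extract_relevant_section_py content keywords out) := by unfold Spec_extract_relevant_section_py; infer_instance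

-- ===== CLAIM (what is proved, stated in full; the proofs are below) =====
def Claim_equal_extract_relevant_section_py : Prop := ∀ (content : String) (keywords : List String), Dom_extract_relevant_section_py content keywords → Spec_extract_relevant_section_py content keywords (extract_relevant_section_py content keywords)

-- ===== LEMMAS AND PROOFS =====

-- the value B returns from an accumulator at a hit
def pvOut : Option String → String
  | some h => PySem.Str.strip h
  | none => "Introduction"

-- first '#'-line of a list (= what A's backward scan finds on the reversed prefix)
def pvFirstHash : List String → String
  | [] => "Introduction"
  | l :: ls => if PySem.Str.startswith l "#" then PySem.Str.strip l else pvFirstHash ls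

lemma pvBackA_spec (lines : List String) :
    ∀ (k : Nat), k ≤ lines.length →
      pvBackA lines (PySem.List.pyRange ((k : Int) - 1) (-1) (-1)) =
        pvFirstHash (lines.take k).reverse := by
  intro k
  induction k with
  | zero =>
    intro _
    rw [PySem.List.pyRange_neg_one_eq_nil (by norm_num)]
    simp [pvBackA, pvFirstHash]
  | succ k ih =>
    intro hk
    have hk' : k < lines.length := hk
    have hcons : PySem.List.pyRange ((k : Int)) (-1) (-1)
        = (k : Int) :: PySem.List.pyRange ((k : Int) - 1) (-1) (-1) :=
      PySem.List.pyRange_neg_one_cons (show (-1:Int) < (k:Int) by omega)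
    have : ((k + 1 : Nat) : Int) - 1 = (k : Int) := by push_cast; ring
    rw [this, hcons]
    have htake : lines.take (k + 1) = lines.take k ++ [lines[k]] := by
      rw [← List.take_concat_get hk']; simp
    rw [htake]
    simp only [pvBackA, PySem.List.pyGet?_natCast, List.getElem?_eq_getElem hk',
      List.reverse_append, List.reverse_cons, List.reverse_nil, List.nil_append,
      List.cons_append, pvFirstHash]
    split
    · rfl
    · exact ih (Nat.le_of_lt hk')

lemma pvLoop_eq (keywords : List String) :
    ∀ (todo done : List String) (cur : Option String),
      pvOut cur = pvFirstHash done.reverse →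
      pvLoopA (done ++ todo) keywords (PySem.List.enumerate todo (done.length : Int)) =
        pvLoopB keywords cur todo := by
  intro todo
  induction todo with
  | nil => intro done cur _; simp [pvLoopA, pvLoopB, PySem.List.enumerate]
  | cons line rest ih =>
    intro done cur hinv
    rw [PySem.List.enumerate_cons]
    show pvLoopA (done ++ line :: rest) keywords _ = pvLoopB keywords cur (line :: rest)
    simp only [pvLoopA, pvLoopB]
    set lines := done ++ line :: rest with hlines
    have hlen : done.length < lines.length := by simp [hlines]
    have hback : pvBackA lines (PySem.List.pyRange (done.length : Int) (-1) (-1)) =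
        pvFirstHash (lines.take (done.length + 1)).reverse := by
      have := pvBackA_spec lines (done.length + 1) hlen
      have hcast : ((done.length + 1 : Nat) : Int) - 1 = (done.length : Int) := by push_cast; ring
      rwa [hcast] at this
    have htake : lines.take (done.length + 1) = done ++ [line] := by
      simp [hlines, List.take_append]
    have hhead : pvFirstHash (lines.take (done.length + 1)).reverse =
        pvOut (if PySem.Str.startswith line "#" then some line else cur) := by
      rw [htake, List.reverse_append]
      simp only [List.reverse_cons, List.reverse_nil, List.nil_append, List.cons_append,
        pvFirstHash]
      split
      · simp [pvOut]
      · rw [← hinv]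
    by_cases hhit : pvKwHit keywords line
    · simp only [hhit, if_true, hback, hhead]
      split <;> simp_all [pvOut]
    · simp only [hhit, if_false, Bool.false_eq_true]
      have := ih (done ++ [line]) (if PySem.Str.startswith line "#" then some line else cur)
        (by rw [← hhead, htake])
      simpa [List.append_assoc] using this
  
-- ===== VERDICT (by name: the statement is the Claim_ definition above) =====
theorem extract_relevant_section_py_spec : Claim_equal_extract_relevant_section_py := by
  intro content keywords _
  show extract_relevant_section_py content keywords = extract_relevant_section_py_alt content keywords
  unfold extract_relevant_section_py extract_relevant_section_py_alt
  exact pvLoop_eq keywords _ [] none rfl
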